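-- pv_equiv track=rewrite | github.com/jdh9232/jdh_leetcode | 838-push-dominoes/838-push-dominoes.py | rightside
-- ===== SOURCE A (Python) =====
-- def rightside(minostr: str):
--     mino = list(minostr)
--     break_down = False
--     for i in range(len(mino)):
--         if mino[i] == "L":
--             break_down = False
--             continue
--         if mino[i] == "R":
--             break_down = True
--             continue
--         # mino [i] == "."
--         if break_down is True:
--             mino[i] = "R"
--     return "".join(mino)
-- ===== SOURCE B (Python) =====
-- def rightside(minostr: str):
--     pieces = []
--     for seg in minostr.split("L"):
--         i = seg.find("R")
--         if i == -1:
--             pieces.append(seg)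
--         else:
--             pieces.append(seg[:i] + "R" * (len(seg) - i))
--     return "L".join(pieces)
-- ===== Notes on version B (the rewrite author's own statement) =====
-- stated objective: alternative
-- what changed: Replaces A's per-character boolean-flag scan over a mutable char list with a tokenize-and-fill pass: split the string on the left-push character, in each segment replace everything from the first right-push character onward, and rejoin the segments.
import Mathlib
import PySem

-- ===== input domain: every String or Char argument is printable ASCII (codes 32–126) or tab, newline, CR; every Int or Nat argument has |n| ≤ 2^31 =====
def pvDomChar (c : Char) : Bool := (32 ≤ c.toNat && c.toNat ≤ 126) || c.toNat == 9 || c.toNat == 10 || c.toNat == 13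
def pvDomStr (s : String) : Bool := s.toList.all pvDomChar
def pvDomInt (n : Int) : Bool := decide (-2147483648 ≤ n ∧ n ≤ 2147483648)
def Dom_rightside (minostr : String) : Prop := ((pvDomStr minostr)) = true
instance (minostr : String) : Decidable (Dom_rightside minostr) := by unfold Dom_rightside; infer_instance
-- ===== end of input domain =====

-- B replaces A's boolean-flag scan with split-on-'L' / fill-from-first-'R' / rejoin; alternative decomposition, same cost.

-- ===== PORT A =====
-- A's loop over the char list with the break_down flag; writes at index i only affect
-- the current position, so the loop is the obvious structural recursion on the list
-- carrying the same flag, branches in the same order.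
def rightsideGo (flag : Bool) : List Char → List Char
  | [] => []
  | c :: rest =>
    if c = 'L' then c :: rightsideGo false rest
    else if c = 'R' then c :: rightsideGo true rest
    else (if flag = true then 'R' else c) :: rightsideGo flag rest

def rightside (minostr : String) : String :=
  String.ofList (rightsideGo false minostr.toList)

-- ===== PORT B =====
-- seg.find("R"); if -1 keep seg, else seg[:i] + "R" * (len(seg) - i)
def fillSeg (seg : List Char) : List Char :=
  let i := PySem.Chars.find seg ['R']
  if i = -1 then seg
  else PySem.Chars.slice seg none (some i) ++ PySem.List.pyRepeat ['R'] ((seg.length : Int) - i)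

def rightside_alt (minostr : String) : String :=
  String.ofList (PySem.Chars.join ['L'] ((PySem.Chars.splitOn minostr.toList ['L']).map fillSeg))

-- ===== PRECONDITION & SPEC =====
def Spec_rightside (minostr : String) (out : String) : Prop := out = rightside_alt minostr
instance (minostr : String) (out : String) : Decidable (Spec_rightside minostr out) := by unfold Spec_rightside; infer_instance

-- ===== CLAIM (what is proved, stated in full; the proofs are below) =====
def Claim_equal_rightside : Prop := ∀ (minostr : String), Dom_rightside minostr → Spec_rightside minostr (rightside minostr)

-- ===== LEMMAS AND PROOFS =====

-- simple split of a char list on 'L', head segment separated from the rest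
def splitLP : List Char → List Char × List (List Char)
  | [] => ([], [])
  | c :: t =>
    let p := splitLP t
    if c = 'L' then ([], p.1 :: p.2) else (c :: p.1, p.2)

-- mathematical form of fillSeg
def fillF (seg : List Char) : List Char :=
  if 'R' ∈ seg then seg.take (seg.idxOf 'R') ++ List.replicate (seg.length - seg.idxOf 'R') 'R' else seg

-- join of the remaining segments, each preceded by 'L'
def jrest : List (List Char) → List Char
  | [] => []
  | s :: ss => 'L' :: (fillF s ++ jrest ss)

lemma splitOn_go_L (l : List Char) : ∀ (fuel : Nat) (cur : List Char) (acc : List (List Char)),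
    l.length < fuel →
    PySem.Chars.splitOn.go ['L'] fuel l cur acc
      = acc.reverse ++ (cur.reverse ++ (splitLP l).1) :: (splitLP l).2 := by
  induction l with
  | nil =>
    intro fuel cur acc h
    match fuel with
    | f + 1 => simp [PySem.Chars.splitOn.go, splitLP]
  | cons c t ih =>
    intro fuel cur acc h
    match fuel with
    | f + 1 =>
      by_cases hc : c = 'L'
      · subst hc
        simp only [PySem.Chars.splitOn.go]
        rw [if_pos (by simp [List.isPrefixOf])]
        simp only [List.length_cons] at h
        rw [show List.drop (['L'] : List Char).length ('L' :: t) = t by simp]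
        rw [ih f [] (cur.reverse :: acc) (by omega)]
        simp [splitLP]
      · simp only [PySem.Chars.splitOn.go]
        rw [if_neg (by simp [List.isPrefixOf]; exact fun h => hc h.symm)]
        simp only [List.length_cons] at h
        rw [ih f (c :: cur) acc (by omega)]
        simp [splitLP, hc]

lemma splitOn_L (l : List Char) :
    PySem.Chars.splitOn l ['L'] = (splitLP l).1 :: (splitLP l).2 := by
  unfold PySem.Chars.splitOn
  rw [splitOn_go_L l (l.length + 1) [] [] (by omega)]
  simp

lemma find_go_R (l : List Char) : ∀ (k : Nat),
    PySem.Chars.find.go ['R'] l k = if 'R' ∈ l then ((k : Int) + l.idxOf 'R') else -1 := by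
  induction l with
  | nil => intro k; simp [PySem.Chars.find.go, List.isEmpty]
  | cons c t ih =>
    intro k
    by_cases hc : c = 'R'
    · subst hc
      simp only [PySem.Chars.find.go]
      rw [if_pos (by simp [List.isPrefixOf])]
      simp [List.idxOf_cons]
    · simp only [PySem.Chars.find.go]
      rw [if_neg (by simp [List.isPrefixOf]; exact fun h => hc h.symm)]
      rw [ih (k + 1)]
      simp only [List.mem_cons]
      by_cases hm : 'R' ∈ t
      · rw [if_pos hm, if_pos (Or.inr hm)]
        rw [List.idxOf_cons_ne _ hc]
        push_cast; ring
      · rw [if_neg hm, if_neg (by simp [hm]; exact fun h => hc h.symm)]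

lemma idxOf_le_length {l : List Char} : l.idxOf 'R' ≤ l.length := List.idxOf_le_length

lemma fillSeg_eq (seg : List Char) : fillSeg seg = fillF seg := by
  unfold fillSeg fillF
  have hfind : PySem.Chars.find seg ['R'] = if 'R' ∈ seg then ((seg.idxOf 'R' : Nat) : Int) else -1 := by
    unfold PySem.Chars.find
    rw [find_go_R seg 0]; simp
  by_cases hm : 'R' ∈ seg
  · rw [if_pos hm] at hfind
    rw [hfind, if_neg (by omega), if_pos hm]
    have hle : seg.idxOf 'R' ≤ seg.length := List.idxOf_le_length
    rw [PySem.Chars.slice_eq_listSlice, PySem.List.slice_to_natCast]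
    have : ((seg.length : Int) - (seg.idxOf 'R' : Int)) = ((seg.length - seg.idxOf 'R' : Nat) : Int) := by
      omega
    rw [this, PySem.List.pyRepeat_singleton]
    simp
  · rw [if_neg hm] at hfind
    rw [hfind, if_pos rfl, if_neg hm]

lemma join_map_fillF (s : List Char) (ss : List (List Char)) :
    PySem.Chars.join ['L'] (((s :: ss).map fillSeg)) = fillF s ++ jrest ss := by
  induction ss generalizing s with
  | nil => simp [PySem.Chars.join, jrest, fillSeg_eq, List.intercalate]
  | cons s' ss' ih =>
    simp only [List.map_cons] at ih ⊢
    unfold PySem.Chars.join at ih ⊢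
    rw [show ['L'].intercalate (fillSeg s :: fillSeg s' :: List.map fillSeg ss')
          = fillSeg s ++ 'L' :: ['L'].intercalate (fillSeg s' :: List.map fillSeg ss') by
        simp [List.intercalate]]
    rw [ih s']
    simp [jrest, fillSeg_eq]

lemma fillF_cons_ne (c : Char) (s : List Char) (hc : c ≠ 'R') :
    fillF (c :: s) = c :: fillF s := by
  unfold fillF
  by_cases hm : 'R' ∈ s
  · rw [if_pos (by simp [hm]), if_pos hm]
    rw [List.idxOf_cons_ne _ hc]
    simp [List.take_succ_cons]
  · rw [if_neg (by simp [hm]; exact fun h => hc h.symm), if_neg hm]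

lemma fillF_cons_R (s : List Char) :
    fillF ('R' :: s) = 'R' :: List.replicate s.length 'R' := by
  unfold fillF
  rw [if_pos (by simp)]
  simp [List.idxOf_cons, List.replicate_succ]

lemma main_lemma (l : List Char) :
    rightsideGo false l = fillF (splitLP l).1 ++ jrest (splitLP l).2
    ∧ rightsideGo true l = List.replicate (splitLP l).1.length 'R' ++ jrest (splitLP l).2 := by
  induction l with
  | nil => simp [rightsideGo, splitLP, fillF, jrest]
  | cons c t ih =>
    obtain ⟨ihF, ihT⟩ := ih
    by_cases hL : c = 'L'
    · subst hL
      constructor <;>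
        simp [rightsideGo, splitLP, jrest, ihF, fillF]
    · by_cases hR : c = 'R'
      · subst hR
        constructor <;>
          simp [rightsideGo, splitLP, fillF_cons_R, ihT, List.replicate_succ]
      · simp only [rightsideGo, if_neg hL, if_neg hR, splitLP]
        constructor
        · rw [fillF_cons_ne c _ hR]
          simp [ihF]
        · simp [ihT, List.replicate_succ]

-- ===== VERDICT (by name: the statement is the Claim_ definition above) =====
theorem rightside_spec : Claim_equal_rightside := by
  intro minostr _
  unfold Spec_rightside rightside rightside_alt
  rw [splitOn_L, join_map_fillF, (main_lemma minostr.toList).1]
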